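-- pv_equiv track=rewrite | github.com/VitaliyLevchyk/STM32-Match-3-Game | GUI/main.py | _bytes_to_ascii
-- ===== SOURCE A (Python) =====
-- def _bytes_to_ascii(raw_bytes):
--     """Convert MCU bytes to ASCII string.
--     Accepts only bytes 32-126 (printable ASCII).
--     Stops at first null (0x00) or garbage byte (>126) — Flash uninitialized = 0xFF."""
--     result = []
--     for b in raw_bytes:
--         if b == 0:
--             break
--         if 32 <= b <= 126:
--             result.append(chr(b))
--     return "".join(result)
-- ===== SOURCE B (Python) =====
-- def _bytes_to_ascii(raw_bytes):
--     # Encode the WHOLE byte sequence into a string in one map: printable bytes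
--     # become their character, a null becomes the sentinel '\x00' (which cannot
--     # clash: printables are >= 32), garbage bytes vanish.  Then cut the result
--     # at the sentinel with str.partition.  No early break, no fused loop.
--     encoded = "".join(
--         chr(b) if 32 <= b <= 126 else ("\x00" if b == 0 else "")
--         for b in raw_bytes
--     )
--     return encoded.partition("\x00")[0]
-- ===== Notes on version B (the rewrite author's own statement) =====
-- stated objective: alternative
-- what changed: B maps the whole input in one pass to an encoded string (printable byte -> its char, null -> a '\x00' sentinel, garbage -> dropped) and then cuts that string at the sentinel with str.partition, instead of A's fused scan with break, skip and a char accumulator.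
import Mathlib
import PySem

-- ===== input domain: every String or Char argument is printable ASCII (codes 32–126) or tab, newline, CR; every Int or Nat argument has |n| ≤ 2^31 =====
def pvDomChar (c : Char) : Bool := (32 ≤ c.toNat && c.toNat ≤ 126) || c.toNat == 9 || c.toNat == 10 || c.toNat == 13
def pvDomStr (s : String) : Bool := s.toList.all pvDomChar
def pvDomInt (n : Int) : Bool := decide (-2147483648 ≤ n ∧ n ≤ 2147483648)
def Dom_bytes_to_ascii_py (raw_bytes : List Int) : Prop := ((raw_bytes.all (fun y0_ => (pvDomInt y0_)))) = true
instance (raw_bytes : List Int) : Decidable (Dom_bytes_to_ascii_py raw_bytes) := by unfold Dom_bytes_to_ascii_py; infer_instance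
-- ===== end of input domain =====

-- B encodes the whole list (printable -> char, 0 -> '\x00' sentinel, garbage -> dropped)
-- and then cuts at the sentinel, instead of A's fused break-and-skip loop (alternative).


-- ===== PORT A =====
-- accumulator loop with break at the first 0, skipping non-printable bytes
def pvA_loop : List Int → List Char → List Char
  | [], result => result
  | b :: rest, result =>
      if b = 0 then result
      else if 32 ≤ b ∧ b ≤ 126 then pvA_loop rest (result ++ [Char.ofNat b.toNat])
      else pvA_loop rest result

def bytes_to_ascii_py (raw_bytes : List Int) : String :=
  String.mk (pvA_loop raw_bytes [])

-- ===== PORT B =====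
-- encode one byte: printable -> its char, 0 -> the '\x00' sentinel, garbage -> nothing
def pvEnc (b : Int) : List Char :=
  if 32 ≤ b ∧ b ≤ 126 then [Char.ofNat b.toNat]
  else if b = 0 then [Char.ofNat 0] else []

def bytes_to_ascii_py_alt (raw_bytes : List Int) : String :=
  let encoded : List Char := raw_bytes.flatMap pvEnc
  -- str.partition("\x00")[0]: the prefix before the first sentinel char (exact,
  -- since the separator is a single character)
  String.mk (encoded.takeWhile (fun c => c ≠ Char.ofNat 0))

-- ===== PRECONDITION & SPEC =====
def Spec_bytes_to_ascii_py (raw_bytes : List Int) (out : String) : Prop := out = bytes_to_ascii_py_alt raw_bytes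
instance (raw_bytes : List Int) (out : String) : Decidable (Spec_bytes_to_ascii_py raw_bytes out) := by unfold Spec_bytes_to_ascii_py; infer_instance

-- ===== CLAIM (what is proved, stated in full; the proofs are below) =====
def Claim_equal_bytes_to_ascii_py : Prop := ∀ (raw_bytes : List Int), Dom_bytes_to_ascii_py raw_bytes → Spec_bytes_to_ascii_py raw_bytes (bytes_to_ascii_py raw_bytes)

-- ===== LEMMAS AND PROOFS =====

theorem pvPrintable_ne_nul (b : Int) (h : 32 ≤ b ∧ b ≤ 126) :
    Char.ofNat b.toNat ≠ Char.ofNat 0 := by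
  have h32 : 32 ≤ b.toNat := by omega
  have h126 : b.toNat ≤ 126 := by omega
  intro hc
  have hv : b.toNat.isValidChar := Or.inl (by omega)
  have : (Char.ofNat b.toNat).toNat = (Char.ofNat 0).toNat := by rw [hc]
  rw [Char.toNat_ofNat, Char.toNat_ofNat, if_pos hv] at this
  simp at this
  omega

theorem pvA_loop_eq (xs : List Int) : ∀ acc,
    pvA_loop xs acc = acc ++ (xs.flatMap pvEnc).takeWhile (fun c => c ≠ Char.ofNat 0) := by
  induction xs with
  | nil => intro acc; simp [pvA_loop]
  | cons b rest ih =>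
    intro acc
    by_cases hp : 32 ≤ b ∧ b ≤ 126
    · have hb : b ≠ 0 := by omega
      simp [pvA_loop, hb, hp, pvEnc, pvPrintable_ne_nul b hp, ih]
    · by_cases hb : b = 0
      · subst hb; simp [pvA_loop, pvEnc]
      · simp [pvA_loop, hb, hp, pvEnc, ih]

-- ===== VERDICT (by name: the statement is the Claim_ definition above) =====
theorem bytes_to_ascii_py_spec : Claim_equal_bytes_to_ascii_py := by
  intro raw_bytes _
  unfold Spec_bytes_to_ascii_py bytes_to_ascii_py bytes_to_ascii_py_alt
  rw [pvA_loop_eq]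
  simp
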